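-- pv_equiv track=rewrite | github.com/Sallyzhoult/advent_of_code_2024 | src/day07/solution.py | part1
-- ===== SOURCE A (Python) =====
-- from typing import List, Tuple
--
-- def part1(data: List[int]) -> int:
--     result =[]
--     for test_value, ops in data:
--         possible_value=[ops[0]]
--         for i in range(1,len(ops)):
--             op2 = ops[i]
--             temp= []
--             for p in possible_value:
--                 temp.append(p+op2)
--                 temp.append(p*op2)
--             possible_value = temp
--         if test_value in possible_value:
--             result.append(test_value)
--     return sum(result)
-- ===== SOURCE B (Python) =====
-- from typing import List, Tuple
--
-- def part1(data: List[int]) -> int: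
--     total = 0
--     for test_value, ops in data:
--         if _reach(test_value, ops[::-1]):
--             total += test_value
--     return total
--
-- def _reach(target, rops):
--     # backward search: rops is the operand list reversed
--     if not rops:
--         return False
--     last = rops[0]
--     rest = rops[1:]
--     if not rest:
--         return target == last
--     if _reach(target - last, rest):
--         return True
--     if last == 0:
--         return target == 0
--     return target % last == 0 and _reach(target // last, rest)
-- ===== Notes on version B (the rewrite author's own statement) =====
-- stated objective: faster
-- what changed: Replaces A's forward enumeration of all 2^(n-1) +/x combination values per equation by a backward depth-first search from the target that undoes the last operand (always try subtraction; try division only when it is exact), short-circuiting on the first success, so most equations are decided after visiting O(n) states instead of 2^(n-1).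
import Mathlib
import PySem

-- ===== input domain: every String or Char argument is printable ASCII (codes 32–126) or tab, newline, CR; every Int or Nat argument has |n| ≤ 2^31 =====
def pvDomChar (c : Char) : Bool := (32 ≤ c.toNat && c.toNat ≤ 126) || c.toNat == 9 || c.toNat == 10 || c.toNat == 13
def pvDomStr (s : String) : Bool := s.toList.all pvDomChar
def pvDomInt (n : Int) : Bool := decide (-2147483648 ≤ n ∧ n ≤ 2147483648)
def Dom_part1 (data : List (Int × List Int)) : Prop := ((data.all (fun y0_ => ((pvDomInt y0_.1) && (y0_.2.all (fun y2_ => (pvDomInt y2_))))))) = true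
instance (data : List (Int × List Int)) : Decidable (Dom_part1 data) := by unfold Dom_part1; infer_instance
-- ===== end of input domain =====

-- B changes the algorithm: backward DFS from the target (subtract always, divide only when
-- exact, first success wins) instead of A's forward enumeration of all 2^(n-1) values.

-- ===== PORT A =====
-- inner loop: temp=[]; for p in possible_value: temp.append(p+op2); temp.append(p*op2)
def innerA (op2 : Int) (pv : List Int) : List Int :=
  pv.foldl (fun temp p => temp ++ [p + op2, p * op2]) []

-- possible_value after the for-i loop (ops[0] raises on empty ops: excluded by Pre_part1,
-- headD 0 stands for the raising access there)
def expandA (ops : List Int) : List Int :=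
  (ops.drop 1).foldl (fun pv op2 => innerA op2 pv) [ops.headD 0]

def part1 (data : List (Int × List Int)) : Int :=
  (data.foldl (fun result p => if p.1 ∈ expandA p.2 then result ++ [p.1] else result) []).sum

-- ===== PORT B =====
-- _reach(target, rops): rops is the operand list reversed
def reachB (target : Int) : List Int → Bool
  | [] => false
  | last :: rest =>
    if rest.isEmpty then target == last
    else if reachB (target - last) rest then true
    else if last == 0 then target == 0
    else (PySem.Int.mod target last == 0) && reachB (PySem.Int.floordiv target last) rest

def part1_alt (data : List (Int × List Int)) : Int :=
  data.foldl (fun total p => if reachB p.1 p.2.reverse then total + p.1 else total) 0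

-- ===== PRECONDITION & SPEC =====
-- A raises IndexError on ops[0] for an equation with an empty operand list; Pre_ excludes exactly those inputs.
def Pre_part1 (data : List (Int × List Int)) : Prop := ∀ p ∈ data, p.2 ≠ []
instance (data : List (Int × List Int)) : Decidable (Pre_part1 data) := by unfold Pre_part1; infer_instance
def pvWitness_part1 : (List (Int × List Int)) := [(3, [1, 2]), (5, [2, 2])]

def Spec_part1 (data : List (Int × List Int)) (out : Int) : Prop := out = part1_alt data
instance (data : List (Int × List Int)) (out : Int) : Decidable (Spec_part1 data out) := by unfold Spec_part1; infer_instance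

-- ===== CLAIM (what is proved, stated in full; the proofs are below) =====
def Claim_equal_part1 : Prop := ∀ (data : List (Int × List Int)), Dom_part1 data → Pre_part1 data → Spec_part1 data (part1 data)

-- ===== LEMMAS AND PROOFS =====

-- the inner fold is init ++ a flatMap
theorem innerA_fold (op2 : Int) (pv acc : List Int) :
    pv.foldl (fun temp p => temp ++ [p + op2, p * op2]) acc
      = acc ++ pv.flatMap (fun p => [p + op2, p * op2]) := by
  induction pv generalizing acc with
  | nil => simp
  | cons h t ih => simp [List.foldl, ih]

theorem mem_innerA (op2 t : Int) (pv : List Int) :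
    t ∈ innerA op2 pv ↔ ∃ p ∈ pv, t = p + op2 ∨ t = p * op2 := by
  unfold innerA
  rw [innerA_fold]
  simp

theorem expandFold_ne_nil (tail : List Int) (pv : List Int) (h : pv ≠ []) :
    tail.foldl (fun pv op2 => innerA op2 pv) pv ≠ [] := by
  induction tail generalizing pv with
  | nil => exact h
  | cons o t ih =>
    apply ih
    show innerA o pv ≠ []
    unfold innerA
    rw [innerA_fold]
    cases pv with
    | nil => exact absurd rfl h
    | cons a r => simp

theorem reachB_main (tail : List Int) :
    ∀ (head t : Int),
      (t ∈ tail.foldl (fun pv op2 => innerA op2 pv) [head]) ↔ reachB t (tail.reverse ++ [head]) = true := by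
  induction tail using List.reverseRecOn with
  | nil => intro head t; simp [reachB]
  | append_singleton tail last ih =>
    intro head t
    rw [List.foldl_append]
    have hS : tail.foldl (fun pv op2 => innerA op2 pv) [head] ≠ [] :=
      expandFold_ne_nil _ _ (by simp)
    set S := tail.foldl (fun pv op2 => innerA op2 pv) [head] with hSdef
    have hrev : (tail ++ [last]).reverse ++ [head] = last :: (tail.reverse ++ [head]) := by simp
    rw [hrev]
    have hne : (tail.reverse ++ [head]).isEmpty = false := by simp
    rw [show reachB t (last :: (tail.reverse ++ [head])) =
        (if (tail.reverse ++ [head]).isEmpty then t == last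
         else if reachB (t - last) (tail.reverse ++ [head]) then true
         else if last == 0 then t == 0
         else (PySem.Int.mod t last == 0) && reachB (PySem.Int.floordiv t last) (tail.reverse ++ [head]))
      from rfl, hne]
    simp only [List.foldl_cons, List.foldl_nil]
    rw [mem_innerA]
    constructor
    · rintro ⟨p, hp, hcase⟩
      rcases hcase with h1 | h2
      · have : reachB (t - last) (tail.reverse ++ [head]) = true := by
          rw [← ih head (t - last)]; subst h1; simpa using hp
        simp [this]
      · by_cases hr : reachB (t - last) (tail.reverse ++ [head]) = true
        · simp [hr]
        · simp only [hr]
          by_cases hz : last = 0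
          · subst hz; simp [h2]
          · have hbne : (last == 0) = false := by simp [hz]
            rw [hbne]
            simp only [Bool.false_eq_true, if_false]
            have hmod : PySem.Int.mod t last = 0 := by
              rw [PySem.Int.mod_eq_zero_iff_dvd]; exact ⟨p, by rw [h2]; ring⟩
            have h3 := PySem.Int.floordiv_mul_add_mod t last
            rw [hmod, add_zero] at h3
            have hdiv : PySem.Int.floordiv t last = p :=
              mul_right_cancel₀ hz (h3.trans h2)
            have hrp : reachB p (tail.reverse ++ [head]) = true := (ih head p).mp hp
            simp [hmod, hdiv, hrp]
    · intro h
      by_cases hr : reachB (t - last) (tail.reverse ++ [head]) = true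
      · rw [← ih head] at hr
        exact ⟨t - last, hr, Or.inl (by ring)⟩
      · simp only [hr, Bool.false_eq_true, if_false] at h
        by_cases hz : last = 0
        · subst hz
          simp at h
          obtain ⟨q, hq⟩ := List.exists_mem_of_ne_nil _ hS
          exact ⟨q, hq, Or.inr (by simp [h])⟩
        · simp only [hz, if_false, beq_iff_eq, Bool.and_eq_true] at h
          obtain ⟨hmod, hrch⟩ := h
          rw [← ih head] at hrch
          refine ⟨_, hrch, Or.inr ?_⟩
          have h3 := PySem.Int.floordiv_mul_add_mod t last
          rw [hmod, add_zero] at h3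
          exact h3.symm

theorem cond_equiv (tv : Int) (ops : List Int) (h : ops ≠ []) :
    (tv ∈ expandA ops) ↔ reachB tv ops.reverse = true := by
  cases ops with
  | nil => exact absurd rfl h
  | cons hd tl =>
    unfold expandA
    simpa using reachB_main tl hd tv

theorem top_fold (data : List (Int × List Int)) :
    ∀ (res : List Int), (∀ p ∈ data, p.2 ≠ []) →
      (data.foldl (fun result p => if p.1 ∈ expandA p.2 then result ++ [p.1] else result) res).sum
        = data.foldl (fun total p => if reachB p.1 p.2.reverse then total + p.1 else total) res.sum := by
  induction data with
  | nil => intro res _; rfl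
  | cons q rest ih =>
    intro res hpre
    have hq : q.2 ≠ [] := hpre q (by simp)
    have hcond := cond_equiv q.1 q.2 hq
    simp only [List.foldl_cons]
    by_cases hc : q.1 ∈ expandA q.2
    · rw [if_pos hc, if_pos (hcond.mp hc),
        ih _ (fun p hp => hpre p (List.mem_cons_of_mem _ hp))]
      simp
    · rw [if_neg hc, if_neg (fun hb => hc (hcond.mpr hb)),
        ih _ (fun p hp => hpre p (List.mem_cons_of_mem _ hp))]

-- ===== VERDICT (by name: the statement is the Claim_ definition above) =====
theorem part1_spec : Claim_equal_part1 := by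
  intro data _ hpre
  unfold Spec_part1 part1 part1_alt
  simpa using top_fold data [] hpre
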